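-- pv_equiv track=rewrite | github.com/DiegoMGar/projecteuler | problem0033/main.py | remove_one_char
-- ===== SOURCE A (Python) =====
-- def remove_one_char(c, phrase):
--     result = []
--     eliminado = False
--     for x in phrase:
--         if x != c or eliminado:
--             result.append(x)
--         else:
--             eliminado = True
--     return "".join(result)
-- ===== SOURCE B (Python) =====
-- def remove_one_char(c, phrase):
--     idx = -1
--     for i, x in enumerate(phrase):
--         if x == c:
--             idx = i
--             break
--     if idx == -1:
--         return phrase
--     return phrase[:idx] + phrase[idx + 1:]
-- ===== Notes on version B (the rewrite author's own statement) =====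
-- stated objective: alternative
-- what changed: B locates the index of the first character equal to c with an enumerate scan that breaks on the first hit and then splices phrase[:idx]+phrase[idx+1:], instead of A's accumulation of every character into a list guarded by a boolean 'eliminado' flag.
import Mathlib
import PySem

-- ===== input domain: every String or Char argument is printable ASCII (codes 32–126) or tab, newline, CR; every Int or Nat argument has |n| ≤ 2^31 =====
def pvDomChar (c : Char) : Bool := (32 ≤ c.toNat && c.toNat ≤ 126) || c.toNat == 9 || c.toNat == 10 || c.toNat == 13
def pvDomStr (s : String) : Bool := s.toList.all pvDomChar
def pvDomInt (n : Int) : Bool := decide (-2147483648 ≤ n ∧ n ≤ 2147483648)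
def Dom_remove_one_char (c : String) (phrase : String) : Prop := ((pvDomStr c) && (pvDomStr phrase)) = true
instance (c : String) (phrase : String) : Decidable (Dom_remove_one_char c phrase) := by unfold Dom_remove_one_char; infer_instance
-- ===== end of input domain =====

-- B replaces A's flag-guarded character accumulation by a locate-then-splice decomposition；alternative, same cost.

-- ===== PORT A =====
-- for x in phrase: if x != c or eliminado: result.append(x) else: eliminado = True
-- (Python's x is a one-character string; 'x != c' is string comparison, exact as String.mk [x] ≠ c)
def rocLoopA (c : String) : List Char → Bool → List Char
  | [], _ => []
  | x :: xs, e =>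
      if String.mk [x] ≠ c ∨ e = true then x :: rocLoopA c xs e
      else rocLoopA c xs true

def remove_one_char (c : String) (phrase : String) : String :=
  String.mk (rocLoopA c phrase.toList false)

-- ===== PORT B =====
-- the enumerate-with-break search for the first index with x == c; B's 'idx = -1' sentinel is Option.none here
def rocFind (c : String) : List Char → Option Nat
  | [] => none
  | x :: xs => if String.mk [x] = c then some 0 else (rocFind c xs).map (· + 1)

-- phrase[:idx] + phrase[idx+1:] with 0 ≤ idx < len(phrase): exactly take idx ++ drop (idx+1)
def remove_one_char_alt (c : String) (phrase : String) : String :=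
  match rocFind c phrase.toList with
  | none => phrase
  | some i => String.mk (phrase.toList.take i ++ phrase.toList.drop (i + 1))

-- ===== PRECONDITION & SPEC =====
def Spec_remove_one_char (c : String) (phrase : String) (out : String) : Prop := out = remove_one_char_alt c phrase
instance (c : String) (phrase : String) (out : String) : Decidable (Spec_remove_one_char c phrase out) := by unfold Spec_remove_one_char; infer_instance

-- ===== CLAIM (what is proved, stated in full; the proofs are below) =====
def Claim_equal_remove_one_char : Prop := ∀ (c : String) (phrase : String), Dom_remove_one_char c phrase → Spec_remove_one_char c phrase (remove_one_char c phrase)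

-- ===== LEMMAS AND PROOFS =====

-- once the flag is set, A's loop copies the rest of the string unchanged
theorem rocLoopA_true (c : String) (xs : List Char) : rocLoopA c xs true = xs := by
  induction xs with
  | nil => rfl
  | cons x xs ih => simp [rocLoopA, ih]

theorem rocLoopA_eq_find (c : String) (xs : List Char) :
    rocLoopA c xs false =
      match rocFind c xs with
      | none => xs
      | some i => xs.take i ++ xs.drop (i + 1) := by
  induction xs with
  | nil => rfl
  | cons x xs ih =>
    by_cases h : String.mk [x] = c
    · simp [rocLoopA, rocFind, h, rocLoopA_true]
    · simp only [rocLoopA, rocFind, h, if_neg, ih]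
      cases hf : rocFind c xs with
      | none => simp [hf, h]
      | some i => simp [hf, h, List.take_succ_cons, List.drop_succ_cons]

-- ===== VERDICT (by name: the statement is the Claim_ definition above) =====
theorem remove_one_char_spec : Claim_equal_remove_one_char := by
  intro c phrase _
  unfold Spec_remove_one_char remove_one_char remove_one_char_alt
  rw [rocLoopA_eq_find]
  cases hf : rocFind c phrase.toList with
  | none => simp [String.mk]
  | some i => simp
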